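-- pv_equiv track=rewrite | github.com/shirshir05/Feature_Commit | Feature/MeasureDiff.py | character_change
-- ===== SOURCE A (Python) =====
-- from collections import Counter
--
-- def character_change(change_line):
--     """
--     return the number of character that Different between two file
--     remove character: " ", ""
--     :param change_line:
--     :return: one feature
--     """
--
--     list_before = change_line[0]
--     chars_before = []
--     for line in list_before:
--         for c in line:
--             chars_before.append(c)
--
--     list_after = change_line[1]
--     chars_after = []
--     for line in list_after:
--         for c in line:
--             chars_after.append(c)
--     dic_after = Counter(chars_after)
--     dic_before = Counter(chars_before)
--     if '' in dic_after:
--         dic_after.pop('')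
--     if '' in dic_before:
--         dic_before.pop('')
--     if ' ' in dic_after:
--         dic_after.pop(' ')
--     if ' ' in dic_before:
--         dic_before.pop(' ')
--     list_character = [abs(dic_after[x] - dic_before[x]) for x in dic_after if x in dic_before]
--     keys1 = dic_before.keys()
--     keys2 = dic_after.keys()
--     difference = keys1 - keys2
--     value = 0
--     for i in difference:
--         value += dic_before[i]
--     return value + sum(list_character)
-- ===== SOURCE B (Python) =====
-- def character_change(change_line):
--     before = [c for line in change_line[0] for c in line if c != ' ']
--     after = [c for line in change_line[1] for c in line if c != ' ']
--     return _run_diff(before, after)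
--
--
-- def _run_diff(b, a):
--     # peel one character class per step: no dictionaries, no counters
--     if not b:
--         return 0
--     c = b[0]
--     rest = [x for x in b if x != c]
--     return abs(b.count(c) - a.count(c)) + _run_diff(rest, a)
-- ===== Notes on version B (the rewrite author's own statement) =====
-- stated objective: alternative
-- what changed: B uses no Counter/dict and no key-set operations at all: it filters spaces while flattening each side into a char list, then recurses over the distinct characters of the before-side, peeling one character class per step (abs(b.count(c) - a.count(c)) plus recursion on the before-list with all c removed).
import Mathlib
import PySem

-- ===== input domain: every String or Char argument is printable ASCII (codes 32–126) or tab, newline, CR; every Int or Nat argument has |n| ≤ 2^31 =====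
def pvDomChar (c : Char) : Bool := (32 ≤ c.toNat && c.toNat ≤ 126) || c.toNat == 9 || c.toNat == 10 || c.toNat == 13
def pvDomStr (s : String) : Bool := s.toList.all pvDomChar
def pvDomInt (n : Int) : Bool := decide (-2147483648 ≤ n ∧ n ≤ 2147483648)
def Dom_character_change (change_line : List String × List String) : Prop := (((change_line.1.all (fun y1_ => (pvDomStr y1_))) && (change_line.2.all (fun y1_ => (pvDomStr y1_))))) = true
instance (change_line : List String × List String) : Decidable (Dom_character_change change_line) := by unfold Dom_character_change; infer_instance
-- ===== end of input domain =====

-- B drops Counters/dicts and key-set arithmetic entirely: it filters spaces while flattening and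
-- recurses over DISTINCT characters of the before-side, peeling one character class per step with
-- list.count (objective: alternative decomposition, same exact result).

-- ===== PORT A =====
def character_change (change_line : List String × List String) : Int :=
  let list_before := change_line.1
  let chars_before := list_before.foldl (fun acc line => line.toList.foldl (fun a c => a ++ [c]) acc) []
  let list_after := change_line.2
  let chars_after := list_after.foldl (fun acc line => line.toList.foldl (fun a c => a ++ [c]) acc) []
  let dic_after := PySem.Dict.counter chars_after
  let dic_before := PySem.Dict.counter chars_before
  -- Python's "'' in dic" is always False here (Counter keys are single characters),
  -- so the two pop('') branches can never fire and have no Char-level counterpart.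
  let dic_after' := if dic_after.contains ' ' then dic_after.erase ' ' else dic_after
  let dic_before' := if dic_before.contains ' ' then dic_before.erase ' ' else dic_before
  let list_character := (dic_after'.keys.filter (fun x => dic_before'.contains x)).map
      (fun x => |dic_after'.getD x 0 - dic_before'.getD x 0|)
  let difference := PySem.Set.diff (PySem.Set.ofList dic_before'.keys) dic_after'.keys
  -- the Python for-loop over the set 'difference' only SUMS values, so it is order-independent
  let value := difference.foldl (fun v i => v + dic_before'.getD i 0) 0
  value + list_character.sum

-- ===== PORT B =====
def runDiffCC : List Char → List Char → Int
  | [], _ => 0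
  | c :: bt, a =>
    let rest := (c :: bt).filter (fun x => x != c)
    |(((c :: bt).count c : Int)) - ((a.count c : Int))| + runDiffCC rest a
termination_by b _ => b.length
decreasing_by
  simp only [List.filter_cons, bne_self_eq_false, List.length_cons]
  exact Nat.lt_succ_of_le (List.length_filter_le _ _)

def character_change_alt (change_line : List String × List String) : Int :=
  let before := change_line.1.flatMap (fun line => line.toList.filter (fun c => c != ' '))
  let after := change_line.2.flatMap (fun line => line.toList.filter (fun c => c != ' '))
  runDiffCC before after

-- ===== PRECONDITION & SPEC =====
def Spec_character_change (change_line : List String × List String) (out : Int) : Prop := out = character_change_alt change_line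
instance (change_line : List String × List String) (out : Int) : Decidable (Spec_character_change change_line out) := by unfold Spec_character_change; infer_instance

-- ===== CLAIM (what is proved, stated in full; the proofs are below) =====
def Claim_equal_character_change : Prop := ∀ (change_line : List String × List String), Dom_character_change change_line → Spec_character_change change_line (character_change change_line)

-- ===== LEMMAS AND PROOFS =====

theorem dict_erase_of_not_contains {κ ν : Type} [BEq κ] (d : PySem.Dict κ ν) (k : κ)
    (h : d.contains k = false) : d.erase k = d := by
  apply PySem.Dict.ext
  simp only [PySem.Dict.erase]
  apply List.filter_eq_self.mpr
  intro p hp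
  simp only [PySem.Dict.contains, List.any_eq_false] at h
  simpa using h p hp

theorem dict_cond_erase {κ ν : Type} [BEq κ] (d : PySem.Dict κ ν) (k : κ) :
    (if d.contains k then d.erase k else d) = d.erase k := by
  by_cases h : d.contains k
  · simp [h]
  · simp [h, dict_erase_of_not_contains d k (by simpa using h)]

theorem dict_get?_erase {κ ν : Type} [BEq κ] [LawfulBEq κ] [DecidableEq κ] (d : PySem.Dict κ ν) (k x : κ) :
    (d.erase k).get? x = if x = k then none else d.get? x := by
  simp only [PySem.Dict.get?, PySem.Dict.erase]
  induction d.items with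
  | nil => simp
  | cons p rest ih =>
    by_cases hpk : p.1 = k <;> by_cases hpx : p.1 = x <;> by_cases hxk : x = k <;>
      simp_all [beq_iff_eq]

theorem dict_getD_erase {κ ν : Type} [BEq κ] [LawfulBEq κ] [DecidableEq κ] (d : PySem.Dict κ ν) (k x : κ) (d0 : ν) :
    (d.erase k).getD x d0 = if x = k then d0 else d.getD x d0 := by
  simp only [PySem.Dict.getD_eq_get?_getD, dict_get?_erase]
  split <;> simp

theorem dict_keys_erase {κ ν : Type} [BEq κ] (d : PySem.Dict κ ν) (k : κ) :
    (d.erase k).keys = d.keys.filter (fun x => !(x == k)) := by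
  simp only [PySem.Dict.keys, PySem.Dict.erase]
  induction d.items with
  | nil => rfl
  | cons p rest ih => by_cases h : p.1 == k <;> simp_all

theorem foldl_set_add_disjoint {α : Type} [BEq α] [LawfulBEq α] (l : List α) (acc : List α)
    (h : l.Nodup) (hd : ∀ x ∈ l, x ∉ acc) :
    List.foldl PySem.Set.add acc l = acc ++ l := by
  induction l generalizing acc with
  | nil => simp
  | cons a t ih =>
    have hna : PySem.Set.add acc a = acc ++ [a] := by
      simp [PySem.Set.add, PySem.Set.contains]
      intro hmem
      exact absurd hmem (hd a (by simp))
    rw [List.foldl_cons, hna, ih (acc ++ [a]) h.of_cons ?_]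
    · simp
    intro x hx hmem
    rcases List.mem_append.mp hmem with hacc | ha
    · exact hd x (by simp [hx]) hacc
    · exact (List.nodup_cons.mp h).1 (by simpa using (List.mem_singleton.mp ha) ▸ hx)

theorem set_ofList_of_nodup {α : Type} [BEq α] [LawfulBEq α] (l : List α) (h : l.Nodup) :
    PySem.Set.ofList l = l := by
  simpa using foldl_set_add_disjoint l [] h (by simp)

theorem sum_split (K1 K2 : List Char) (f g : Char → Int)
    (h1 : K1.Nodup) (h2 : K2.Nodup)
    (hg0 : ∀ x, x ∉ K2 → g x = 0)
    (hfpos : ∀ x, 0 ≤ f x) :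
    ((K1.filter (fun x => !decide (x ∈ K2))).map f).sum
      + ((K2.filter (fun x => decide (x ∈ K1))).map (fun x => |g x - f x|)).sum
    = (K1.map (fun x => |f x - g x|)).sum := by
  have hperm := List.filter_append_perm (fun x => decide (x ∈ K2)) K1
  have hsum := ((hperm.map (fun x => |f x - g x|)).sum_eq)
  rw [← hsum, List.map_append, List.sum_append]
  have e2 : (K1.filter (fun x => !decide (x ∈ K2))).map (fun x => |f x - g x|)
      = (K1.filter (fun x => !decide (x ∈ K2))).map f := by
    apply List.map_congr_left
    intro x hx
    have hx2 : x ∉ K2 := by simpa using (List.of_mem_filter hx)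
    rw [hg0 x hx2, sub_zero, abs_of_nonneg (hfpos x)]
  have hpl : (K1.filter (fun x => decide (x ∈ K2))).Perm (K2.filter (fun x => decide (x ∈ K1))) := by
    rw [List.perm_ext_iff_of_nodup (h1.filter _) (h2.filter _)]
    intro a; simp [List.mem_filter, and_comm]
  have e1 : ((K1.filter (fun x => decide (x ∈ K2))).map (fun x => |f x - g x|)).sum
      = ((K2.filter (fun x => decide (x ∈ K1))).map (fun x => |g x - f x|)).sum := by
    rw [(hpl.map (fun x => |f x - g x|)).sum_eq]
    congr 1
    apply List.map_congr_left
    intro x _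
    exact abs_sub_comm _ _
  rw [e2, e1]
  ring

-- A's value is the sum of |before-count − after-count| over the (space-erased) before-counter's keys
theorem character_change_as_sum (cl : List String × List String) :
    character_change cl
      = (((PySem.Dict.counter (cl.1.flatMap String.toList)).erase ' ').keys.map
          (fun x => |((PySem.Dict.counter (cl.1.flatMap String.toList)).erase ' ').getD x 0
                    - ((PySem.Dict.counter (cl.2.flatMap String.toList)).erase ' ').getD x 0|)).sum := by
  unfold character_change
  simp only [PySem.List.foldl_append_singleton_eq_self, List.nil_append,
    PySem.List.foldl_append_eq_flatMap, dict_cond_erase]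
  set L := cl.1.flatMap String.toList with hL
  set M := cl.2.flatMap String.toList with hM
  set d1 := (PySem.Dict.counter L).erase ' ' with hd1
  set d2 := (PySem.Dict.counter M).erase ' ' with hd2
  have hk1 : d1.keys.Nodup := by
    rw [hd1, dict_keys_erase]
    exact (PySem.Dict.nodup_keys_counter L).filter _
  have hk2 : d2.keys.Nodup := by
    rw [hd2, dict_keys_erase]
    exact (PySem.Dict.nodup_keys_counter M).filter _
  rw [PySem.List.foldl_add, set_ofList_of_nodup _ hk1]
  simp only [PySem.Set.diff, PySem.Set.contains, zero_add]
  have hcontains : ∀ x, d1.contains x = decide (x ∈ d1.keys) :=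
    fun x => PySem.Dict.contains_eq_decide_mem_keys d1 x
  simp only [hcontains, List.contains_eq_mem]
  exact sum_split d1.keys d2.keys (fun x => d1.getD x 0) (fun x => d2.getD x 0) hk1 hk2
    (fun x hx => PySem.Dict.getD_of_not_contains d2 0
      (by rw [PySem.Dict.contains_eq_decide_mem_keys]; simpa using hx))
    (fun x => by
      show 0 ≤ ((PySem.Dict.counter L).erase ' ').getD x 0
      rw [dict_getD_erase]
      split
      · exact le_refl 0
      · rw [PySem.Dict.getD_counter]; positivity)

-- B's recursion over distinct characters equals the abs-diff sum over ANY nodup enumeration K of b's members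
theorem runDiffCC_eq_sum (b a K : List Char) (hK : K.Nodup) (hmem : ∀ x, x ∈ K ↔ x ∈ b) :
    runDiffCC b a = (K.map (fun x => |(b.count x : Int) - (a.count x : Int)|)).sum := by
  induction b, a using runDiffCC.induct generalizing K with
  | case1 a =>
    have : K = [] := List.eq_nil_iff_forall_not_mem.mpr (fun x hx => by simpa using (hmem x).mp hx)
    simp [runDiffCC, this]
  | case2 c bt a rest ih =>
    have hrest : rest = (c :: bt).filter (fun x => x != c) := rfl
    have hcK : c ∈ K := (hmem c).mpr (by simp)
    have hperm : K.Perm (c :: K.erase c) := List.perm_cons_erase hcK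
    have hKe : (K.erase c).Nodup := hK.erase c
    have hmem' : ∀ x, x ∈ K.erase c ↔ x ∈ rest := by
      intro x
      rw [hK.mem_erase_iff, hrest]
      simp [List.mem_filter, hmem x, bne_iff_ne]
      tauto
    rw [(hperm.map _).sum_eq, List.map_cons, List.sum_cons, runDiffCC]
    rw [← hrest, ih (K.erase c) hKe hmem']
    congr 1
    apply congrArg List.sum
    apply List.map_congr_left
    intro x hx
    have hxc : x ≠ c := (hK.mem_erase_iff.mp hx).1
    have : rest.count x = (c :: bt).count x := by
      rw [hrest]
      exact List.count_filter (by simp [bne_iff_ne, hxc])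
    rw [this]

theorem character_change_eq (cl : List String × List String) :
    character_change cl = character_change_alt cl := by
  rw [character_change_as_sum]
  unfold character_change_alt
  set L := cl.1.flatMap String.toList with hL
  set M := cl.2.flatMap String.toList with hM
  have hbefore : cl.1.flatMap (fun line => line.toList.filter (fun c => c != ' '))
      = L.filter (fun c => c != ' ') := by
    rw [hL, List.filter_flatMap]
  have hafter : cl.2.flatMap (fun line => line.toList.filter (fun c => c != ' '))
      = M.filter (fun c => c != ' ') := by
    rw [hM, List.filter_flatMap]
  rw [hbefore, hafter]
  set d1 := (PySem.Dict.counter L).erase ' ' with hd1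
  set d2 := (PySem.Dict.counter M).erase ' ' with hd2
  have hk1 : d1.keys.Nodup := by
    rw [hd1, dict_keys_erase]
    exact (PySem.Dict.nodup_keys_counter L).filter _
  have hmemk : ∀ x, x ∈ d1.keys ↔ x ∈ L.filter (fun c => c != ' ') := by
    intro x
    rw [hd1, dict_keys_erase, PySem.Dict.keys_counter]
    simp [List.mem_filter, PySem.Set.mem_ofList]
  rw [runDiffCC_eq_sum (L.filter (fun c => c != ' ')) (M.filter (fun c => c != ' ')) d1.keys hk1 hmemk]
  apply congrArg List.sum
  apply List.map_congr_left
  intro x hx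
  have hxs : x ≠ ' ' := by
    have := (hmemk x).mp hx
    simp [List.mem_filter, bne_iff_ne] at this
    exact this.2
  have h1 : d1.getD x 0 = ((L.filter (fun c => c != ' ')).count x : Int) := by
    rw [hd1, dict_getD_erase, if_neg hxs, PySem.Dict.getD_counter,
      List.count_filter (by simp [bne_iff_ne, hxs])]
  have h2 : d2.getD x 0 = ((M.filter (fun c => c != ' ')).count x : Int) := by
    rw [hd2, dict_getD_erase, if_neg hxs, PySem.Dict.getD_counter,
      List.count_filter (by simp [bne_iff_ne, hxs])]
  rw [h1, h2]

-- ===== VERDICT (by name: the statement is the Claim_ definition above) =====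
theorem character_change_spec : Claim_equal_character_change := by
  intro cl _
  exact character_change_eq cl
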